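-- pv_equiv track=rewrite | github.com/phrynevych/egoi-2025 | day2/laserstrike/data/gen.py | broom_alt
-- ===== SOURCE A (Python) =====
-- def broom_alt(n,k):
--     eds = []
--     eds.append((0,1))
--     for i in range(2,k):
--         eds.append((1,i))
--     l = k-1
--     h = n-1
--     even = 1
--     for i in range(n-k):
--         eds.append((h,l))
--         if even:
--             l += 1
--         else:
--             h -= 1
--         even = 1-even
--     return eds
-- ===== SOURCE B (Python) =====
-- def broom_alt(n, k):
--     star = [(0, 1)] + [(1, i) for i in range(2, k)]
--     handle = [((n - 1) - i // 2, (k - 1) + (i + 1) // 2) for i in range(n - k)]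
--     return star + handle
-- ===== Notes on version B (the rewrite author's own statement) =====
-- stated objective: simpler
-- what changed: The stateful alternating handle loop (mutable l/h accumulators and an even toggle with an if/else) is replaced by a single comprehension producing each edge directly from the closed-form pair ((n-1)-i//2, (k-1)+(i+1)//2); the star part becomes a comprehension too.
import Mathlib
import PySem

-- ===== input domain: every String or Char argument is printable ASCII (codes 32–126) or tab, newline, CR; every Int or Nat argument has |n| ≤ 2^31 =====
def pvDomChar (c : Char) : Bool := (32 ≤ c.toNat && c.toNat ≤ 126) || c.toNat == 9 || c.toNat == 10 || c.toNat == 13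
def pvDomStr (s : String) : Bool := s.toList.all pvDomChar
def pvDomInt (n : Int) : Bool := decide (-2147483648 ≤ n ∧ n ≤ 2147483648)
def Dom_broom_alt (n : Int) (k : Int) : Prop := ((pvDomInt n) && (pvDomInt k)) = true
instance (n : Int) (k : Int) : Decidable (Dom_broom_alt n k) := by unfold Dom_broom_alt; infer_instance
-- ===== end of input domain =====

-- B replaces A's stateful alternating handle loop (mutable l/h and an even toggle) by
-- comprehensions with the closed-form edge ((n-1)-i//2, (k-1)+(i+1)//2); objective: simpler, same cost.
-- ===== PORT A =====
def broom_alt (n : Int) (k : Int) : List (Int × Int) :=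
  let eds : List (Int × Int) := []
  let eds := eds ++ [((0 : Int), (1 : Int))]
  let eds := (PySem.List.pyRange 2 k 1).foldl (fun eds i => eds ++ [((1 : Int), i)]) eds
  let st :=
    (PySem.List.pyRange 0 (n - k) 1).foldl
      (fun (st : List (Int × Int) × Int × Int × Int) _i =>
        let eds := st.1; let l := st.2.1; let h := st.2.2.1; let even := st.2.2.2
        let eds := eds ++ [(h, l)]
        let l := if even ≠ 0 then l + 1 else l
        let h := if even ≠ 0 then h else h - 1
        (eds, l, h, 1 - even))
      (eds, k - 1, n - 1, 1)
  st.1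

-- ===== PORT B =====
def broom_alt_alt (n : Int) (k : Int) : List (Int × Int) :=
  (((0 : Int), (1 : Int)) :: (PySem.List.pyRange 2 k 1).map (fun i => ((1 : Int), i)))
    ++ (PySem.List.pyRange 0 (n - k) 1).map
        (fun i => (n - 1 - PySem.Int.floordiv i 2, k - 1 + PySem.Int.floordiv (i + 1) 2))

-- ===== PRECONDITION & SPEC =====
def Spec_broom_alt (n : Int) (k : Int) (out : List (Int × Int)) : Prop := out = broom_alt_alt n k
instance (n : Int) (k : Int) (out : List (Int × Int)) : Decidable (Spec_broom_alt n k out) := by unfold Spec_broom_alt; infer_instance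

-- ===== CLAIM (what is proved, stated in full; the proofs are below) =====
def Claim_equal_broom_alt : Prop := ∀ (n : Int) (k : Int), Dom_broom_alt n k → Spec_broom_alt n k (broom_alt n k)


-- ===== LEMMAS AND PROOFS =====

-- The handle-loop step of port A, named for the proofs.
def broomStep (st : List (Int × Int) × Int × Int × Int) (_i : Int) :
    List (Int × Int) × Int × Int × Int :=
  let eds := st.1; let l := st.2.1; let h := st.2.2.1; let even := st.2.2.2
  let eds := eds ++ [(h, l)]
  let l := if even ≠ 0 then l + 1 else l
  let h := if even ≠ 0 then h else h - 1
  (eds, l, h, 1 - even)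

lemma broom_handle_fold (L : List Int) : ∀ (eds : List (Int × Int)) (l h : Int),
    (L.foldl broomStep (eds, l, h, 1)).1
      = eds ++ (List.range L.length).map
          (fun j => (h - ((j / 2 : Nat) : Int), l + (((j + 1) / 2 : Nat) : Int)))
  ∧ (L.foldl broomStep (eds, l, h, 0)).1
      = eds ++ (List.range L.length).map
          (fun j => (h - (((j + 1) / 2 : Nat) : Int), l + ((j / 2 : Nat) : Int))) := by
  induction L with
  | nil => intro eds l h; simp
  | cons x L ih =>
    intro eds l h
    constructor
    · show ((L.foldl broomStep (broomStep (eds, l, h, 1) x)).1) = _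
      have hstep : broomStep (eds, l, h, 1) x = (eds ++ [(h, l)], l + 1, h, 0) := by
        simp [broomStep]
      rw [hstep, (ih (eds ++ [(h, l)]) (l + 1) h).2]
      rw [List.length_cons, List.range_succ_eq_map, List.map_cons, List.map_map]
      simp only [List.append_assoc, List.singleton_append]
      congr 1
      congr 1
      · norm_num
      · apply List.map_congr_left
        intro j _
        have h2 : (j + 1 + 1) / 2 = j / 2 + 1 := by omega
        simp only [Function.comp_apply, Nat.succ_eq_add_one, h2, Nat.cast_add,
          Prod.mk.injEq]
        push_cast
        constructor <;> first | trivial | omega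
    · show ((L.foldl broomStep (broomStep (eds, l, h, 0) x)).1) = _
      have hstep : broomStep (eds, l, h, 0) x = (eds ++ [(h, l)], l, h - 1, 1) := by
        simp [broomStep]
      rw [hstep, (ih (eds ++ [(h, l)]) l (h - 1)).1]
      rw [List.length_cons, List.range_succ_eq_map, List.map_cons, List.map_map]
      simp only [List.append_assoc, List.singleton_append]
      congr 1
      congr 1
      · norm_num
      · apply List.map_congr_left
        intro j _
        have h2 : (j + 1 + 1) / 2 = j / 2 + 1 := by omega
        simp only [Function.comp_apply, Nat.succ_eq_add_one, h2, Nat.cast_add,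
          Prod.mk.injEq]
        push_cast
        constructor <;> first | trivial | omega

lemma pyRange_zero_one (b : Int) :
    PySem.List.pyRange 0 b 1 = List.map (fun k : Nat => (k : Int)) (List.range b.toNat) := by
  by_cases hb : 0 ≤ b
  · conv_lhs => rw [show b = ((b.toNat : Nat) : Int) by omega]
    exact PySem.List.pyRange_zero_natCast _
  · rw [show b.toNat = 0 by omega]
    simp only [List.range_zero, List.map_nil]
    simp [PySem.List.pyRange]
    omega

-- ===== VERDICT (by name: the statement is the Claim_ definition above) =====
theorem broom_alt_spec : Claim_equal_broom_alt := by
  intro n k _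
  show broom_alt n k = broom_alt_alt n k
  unfold broom_alt broom_alt_alt
  simp only
  rw [show (fun (st : List (Int × Int) × Int × Int × Int) (_i : Int) =>
        let eds := st.1; let l := st.2.1; let h := st.2.2.1; let even := st.2.2.2
        let eds := eds ++ [(h, l)]
        let l := if even ≠ 0 then l + 1 else l
        let h := if even ≠ 0 then h else h - 1
        (eds, l, h, 1 - even)) = broomStep from rfl]
  rw [(broom_handle_fold (PySem.List.pyRange 0 (n - k) 1) _ (k - 1) (n - 1)).1]
  rw [PySem.List.foldl_append_singleton_eq_map]
  rw [pyRange_zero_one (n - k)]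
  simp only [List.length_map, List.length_range, List.map_map]
  simp only [List.nil_append, List.cons_append]
  congr 1
  congr 1
  apply List.map_congr_left
  intro j _
  have h1 : PySem.Int.floordiv ((j : Int)) 2 = ((j / 2 : Nat) : Int) :=
    PySem.Int.floordiv_natCast j 2
  have h2 : PySem.Int.floordiv ((j : Int) + 1) 2 = (((j + 1) / 2 : Nat) : Int) := by
    rw [show ((j : Int) + 1) = (((j + 1 : Nat)) : Int) by push_cast; ring]
    exact PySem.Int.floordiv_natCast (j + 1) 2
  simp only [Function.comp_apply, h1, h2]
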